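-- pv_equiv track=rewrite | github.com/francomak/Data-Harvesting-Phase-3 | textnorm_scripts/expand_acronyms.py | expand_acronym
-- ===== SOURCE A (Python) =====
-- def separate_word(word):
--     cut1=0
--     while cut1<len(word) and not word[cut1].isalpha():
--         cut1+=1
--     cut2=cut1
--     while cut2<len(word) and word[cut2].isalpha():
--         cut2+=1
--     return word[0:cut1], word[cut1:cut2], word[cut2:]
--
-- def expand_acronym(word):
--     prefix, letters, suffix = separate_word(word)
--     # the suffix might contain letters, leave unchanged if this is the case, not an acronym
--     for i in suffix:
--         if i.isalpha():
--             return word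
--     if letters.isupper():
--         letters = " ".join(list(letters))
--     return prefix+letters+suffix
-- ===== SOURCE B (Python) =====
-- def expand_acronym(word):
--     idx = [k for k, c in enumerate(word) if c.isalpha()]
--     if not idx:
--         return word
--     lo, hi = idx[0], idx[-1]
--     if hi - lo + 1 != len(idx):
--         return word  # alphabetic chars not one contiguous run: suffix would contain letters
--     letters = word[lo:hi + 1]
--     if not letters.isupper():
--         return word
--     return word[:lo] + " ".join(letters) + word[hi + 1:]
-- ===== Notes on version B (the rewrite author's own statement) =====
-- stated objective: alternative
-- what changed: Replaces A's two cursor while-loops plus a separate suffix scan with a single pass that collects the positions of all alphabetic characters and decides everything from one contiguity test (last-first+1 == count) on that index list.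
import Mathlib
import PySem

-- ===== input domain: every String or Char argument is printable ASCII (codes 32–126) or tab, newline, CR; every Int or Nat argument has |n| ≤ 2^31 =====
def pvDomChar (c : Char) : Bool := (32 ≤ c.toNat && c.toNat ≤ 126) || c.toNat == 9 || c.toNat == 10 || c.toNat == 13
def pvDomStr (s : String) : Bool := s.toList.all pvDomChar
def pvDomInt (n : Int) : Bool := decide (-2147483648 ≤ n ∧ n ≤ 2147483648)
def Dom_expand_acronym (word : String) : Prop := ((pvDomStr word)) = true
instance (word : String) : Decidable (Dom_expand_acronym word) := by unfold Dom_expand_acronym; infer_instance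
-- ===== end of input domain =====

-- B replaces A's two cursor loops and suffix scan by one pass collecting the alphabetic
-- positions plus a contiguity test (alternative decomposition; a timing run measured it faster).

-- ===== PORT A =====
-- `.isupper()` on a string: some cased char and no lowercase one; exact on the ASCII domain.
def pyStrIsupper (cs : List Char) : Bool :=
  cs.any PySem.Chars.isalpha && !(cs.any PySem.Chars.islower)

-- each cursor `while` loop of `separate_word` advances past the leading run satisfying `p`;
-- ported as the length of that leading run.
def pvRun (p : Char → Bool) : List Char → Nat
  | [] => 0
  | c :: rest => if p c then pvRun p rest + 1 else 0

def separate_word (l : List Char) : List Char × List Char × List Char :=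
  let cut1 := pvRun (fun c => !PySem.Chars.isalpha c) l
  let cut2 := cut1 + pvRun PySem.Chars.isalpha (l.drop cut1)
  (PySem.List.slice l (some 0) (some (cut1 : Int)),
   PySem.List.slice l (some (cut1 : Int)) (some (cut2 : Int)),
   PySem.List.slice l (some (cut2 : Int)) none)

def expand_acronym (word : String) : String :=
  let t := separate_word word.toList
  -- `for i in suffix: if i.isalpha(): return word`
  if t.2.2.any PySem.Chars.isalpha then word
  else
    let letters := if pyStrIsupper t.2.1
      then PySem.Chars.join [' '] (t.2.1.map (fun c => [c])) else t.2.1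
    String.ofList (t.1 ++ letters ++ t.2.2)

-- ===== PORT B =====
-- `[k for k, c in enumerate(word) if c.isalpha()]`, the enumerate counter as an argument.
def pvAlphaIdx (i : Nat) : List Char → List Nat
  | [] => []
  | c :: rest =>
      if PySem.Chars.isalpha c then i :: pvAlphaIdx (i + 1) rest
      else pvAlphaIdx (i + 1) rest

def expand_acronym_alt (word : String) : String :=
  let l := word.toList
  let idx := pvAlphaIdx 0 l
  if idx = [] then word
  else
    let lo := idx.headD 0
    let hi := idx.getLastD 0
    if hi - lo + 1 ≠ idx.length then word
    else
      let letters := PySem.List.slice l (some (lo : Int)) (some ((hi + 1 : Nat) : Int))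
      if !pyStrIsupper letters then word
      else String.ofList (PySem.List.slice l none (some (lo : Int)) ++
             PySem.Chars.join [' '] (letters.map (fun c => [c])) ++
             PySem.List.slice l (some ((hi + 1 : Nat) : Int)) none)

-- ===== PRECONDITION & SPEC =====
def Spec_expand_acronym (word : String) (out : String) : Prop := out = expand_acronym_alt word
instance (word : String) (out : String) : Decidable (Spec_expand_acronym word out) := by unfold Spec_expand_acronym; infer_instance

-- ===== CLAIM (what is proved, stated in full; the proofs are below) =====
def Claim_equal_expand_acronym : Prop := ∀ (word : String), Dom_expand_acronym word → Spec_expand_acronym word (expand_acronym word)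

-- ===== LEMMAS AND PROOFS =====

theorem pvRun_take (p : Char → Bool) (l : List Char) :
    l.take (pvRun p l) = l.takeWhile p := by
  induction l with
  | nil => rfl
  | cons c rest ih =>
      by_cases h : p c = true <;> simp [pvRun, List.takeWhile, h, ih]

theorem pvRun_drop (p : Char → Bool) (l : List Char) :
    l.drop (pvRun p l) = l.dropWhile p := by
  induction l with
  | nil => rfl
  | cons c rest ih =>
      by_cases h : p c = true <;> simp [pvRun, List.dropWhile, h, ih]

theorem separate_word_eq (l : List Char) :
    separate_word l =
      (l.takeWhile (fun c => !PySem.Chars.isalpha c),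
       (l.dropWhile (fun c => !PySem.Chars.isalpha c)).takeWhile PySem.Chars.isalpha,
       (l.dropWhile (fun c => !PySem.Chars.isalpha c)).dropWhile PySem.Chars.isalpha) := by
  unfold separate_word
  simp only [PySem.List.slice_zero_start, PySem.List.slice_to_natCast,
    PySem.List.slice_natCast, PySem.List.slice_from_natCast,
    Nat.add_sub_cancel_left, Prod.mk.injEq]
  refine ⟨?_, ?_, ?_⟩
  · exact pvRun_take _ l
  · rw [pvRun_drop, pvRun_take]
  · rw [← List.drop_drop, pvRun_drop, pvRun_drop]

theorem pvAlphaIdx_append (xs ys : List Char) (i : Nat) :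
    pvAlphaIdx i (xs ++ ys) = pvAlphaIdx i xs ++ pvAlphaIdx (i + xs.length) ys := by
  induction xs generalizing i with
  | nil => simp [pvAlphaIdx]
  | cons c rest ih =>
      by_cases h : PySem.Chars.isalpha c = true <;>
        simp [pvAlphaIdx, h, ih, Nat.add_assoc, Nat.add_comm 1 rest.length]

theorem pvAlphaIdx_none (xs : List Char) (i : Nat)
    (h : ∀ c ∈ xs, PySem.Chars.isalpha c = false) : pvAlphaIdx i xs = [] := by
  induction xs generalizing i with
  | nil => rfl
  | cons c rest ih =>
      have hc := h c (by simp)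
      simp [pvAlphaIdx, hc, ih _ (fun d hd => h d (by simp [hd]))]

theorem pvAlphaIdx_all (xs : List Char) (i : Nat)
    (h : ∀ c ∈ xs, PySem.Chars.isalpha c = true) :
    pvAlphaIdx i xs = List.range' i xs.length := by
  induction xs generalizing i with
  | nil => rfl
  | cons c rest ih =>
      have hc := h c (by simp)
      simp [pvAlphaIdx, hc, ih _ (fun d hd => h d (by simp [hd])), List.range'_succ]

theorem pvAlphaIdx_lb (xs : List Char) (i j : Nat) (h : j ∈ pvAlphaIdx i xs) : i ≤ j := by
  induction xs generalizing i with
  | nil => simp [pvAlphaIdx] at h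
  | cons c rest ih =>
      by_cases hc : PySem.Chars.isalpha c = true
      · simp [pvAlphaIdx, hc] at h
        rcases h with h | h
        · omega
        · exact le_trans (by omega) (ih _ h)
      · simp [pvAlphaIdx, hc] at h
        exact le_trans (by omega) (ih _ h)

theorem pvAlphaIdx_ne_nil (xs : List Char) (i : Nat)
    (h : xs.any PySem.Chars.isalpha = true) : pvAlphaIdx i xs ≠ [] := by
  induction xs generalizing i with
  | nil => simp at h
  | cons c rest ih =>
      by_cases hc : PySem.Chars.isalpha c = true
      · simp [pvAlphaIdx, hc]
      · simp only [List.any_cons, hc, Bool.false_or] at h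
        simp [pvAlphaIdx, hc]
        exact ih _ h

theorem pvAlphaIdx_dense (xs : List Char) (i : Nat) (h : pvAlphaIdx i xs ≠ []) :
    i + (pvAlphaIdx i xs).length ≤ (pvAlphaIdx i xs).getLastD 0 + 1 := by
  induction xs generalizing i with
  | nil => simp [pvAlphaIdx] at h
  | cons c rest ih =>
      by_cases hc : PySem.Chars.isalpha c = true
      · rcases hrr : pvAlphaIdx (i + 1) rest with _ | ⟨a, t⟩
        · simp [pvAlphaIdx, hc, hrr]
        · have ihr := ih (i + 1) (by rw [hrr]; simp)
          rw [hrr] at ihr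
          simp only [List.length_cons, List.getLastD_cons] at ihr
          simp only [pvAlphaIdx, hc, if_pos, hrr, List.length_cons,
            List.getLastD_cons]
          omega
      · simp only [pvAlphaIdx, hc, Bool.false_eq_true, if_false] at h ⊢
        have := ih (i + 1) h
        omega

theorem getLastD_append_of_ne_nil (xs ys : List Nat) (d : Nat) (h : ys ≠ []) :
    (xs ++ ys).getLastD d = ys.getLastD d := by
  induction xs with
  | nil => rfl
  | cons a t ih =>
      rcases t with _ | _ <;> rcases ys with _ | _ <;>
        simp_all

theorem range'_getLastD (a n d : Nat) (h : 1 ≤ n) :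
    (List.range' a n).getLastD d = a + n - 1 := by
  induction n generalizing a d with
  | zero => omega
  | succ m ih =>
      rcases Nat.eq_zero_or_pos m with hm | hm
      · subst hm; simp [List.range'_succ]
      · rw [List.range'_succ, List.getLastD_cons, ih (a + 1) a hm]; omega

theorem getLastD_mem (l : List Nat) (d : Nat) (h : l ≠ []) : l.getLastD d ∈ l := by
  induction l generalizing d with
  | nil => exact absurd rfl h
  | cons a t ih =>
      rcases t with _ | ⟨b, u⟩
      · simp
      · exact List.mem_cons_of_mem a (ih a (by simp))

theorem expand_acronym_eq (word : String) : expand_acronym word = expand_acronym_alt word := by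
  have hword : String.ofList word.toList = word := String.ofList_toList
  simp only [expand_acronym, expand_acronym_alt, separate_word_eq]
  generalize hR : List.dropWhile (fun c => !PySem.Chars.isalpha c) word.toList = rest
  generalize hPre : List.takeWhile (fun c => !PySem.Chars.isalpha c) word.toList = pre
  generalize hMid : List.takeWhile PySem.Chars.isalpha rest = mid
  generalize hSuf : List.dropWhile PySem.Chars.isalpha rest = suf
  have hdecomp : word.toList = pre ++ (mid ++ suf) := by
    rw [← hPre, ← hMid, ← hSuf, List.takeWhile_append_dropWhile, ← hR,
      List.takeWhile_append_dropWhile]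
  have hpreF : ∀ c ∈ pre, PySem.Chars.isalpha c = false := by
    intro c hc
    rw [← hPre] at hc
    simpa using List.mem_takeWhile_imp hc
  have hmidF : ∀ c ∈ mid, PySem.Chars.isalpha c = true := by
    intro c hc
    rw [← hMid] at hc
    exact List.mem_takeWhile_imp hc
  have hsufhead : ∀ x t, suf = x :: t → PySem.Chars.isalpha x = false := by
    intro x t hx
    have h := List.head?_dropWhile_not PySem.Chars.isalpha rest
    rw [hSuf, hx] at h
    exact h
  have hmid0 : mid = [] → suf = [] := by
    intro h0
    rcases hr : rest with _ | ⟨x, t⟩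
    · rw [← hSuf, hr]; rfl
    · have hx := List.head?_dropWhile_not (fun c => !PySem.Chars.isalpha c) word.toList
      rw [hR, hr] at hx
      have hPx : PySem.Chars.isalpha x = true := by simpa using hx
      rw [← hMid, hr] at h0
      simp [List.takeWhile, hPx] at h0
  have hidx : pvAlphaIdx 0 word.toList =
      List.range' pre.length mid.length ++ pvAlphaIdx (pre.length + mid.length) suf := by
    conv_lhs => rw [hdecomp]
    rw [pvAlphaIdx_append, pvAlphaIdx_append, pvAlphaIdx_none pre 0 hpreF,
      pvAlphaIdx_all mid _ hmidF]
    simp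
  rw [hidx]
  clear hR hPre hMid hSuf
  rcases hm : mid with _ | ⟨m0, mt⟩
  · -- no alphabetic run: both sides return the word unchanged
    subst hm
    have hs0 := hmid0 rfl
    subst hs0
    have hpl : pre = word.toList := by simpa using hdecomp.symm
    simp [pvAlphaIdx, pyStrIsupper, hpl, hword]
  · subst hm
    by_cases hany : suf.any PySem.Chars.isalpha = true
    · -- letters in the suffix: A early-returns, B's contiguity test fails
      rw [if_pos hany]
      rcases hs : suf with _ | ⟨s0, st⟩
      · rw [hs] at hany; simp at hany
      · have hs0 : PySem.Chars.isalpha s0 = false := hsufhead s0 st hs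
        subst hs
        have hstany : st.any PySem.Chars.isalpha = true := by
          simpa [List.any_cons, hs0] using hany
        have hT : pvAlphaIdx (pre.length + (m0 :: mt).length) (s0 :: st) =
            pvAlphaIdx (pre.length + (m0 :: mt).length + 1) st := by
          simp [pvAlphaIdx, hs0]
        rw [hT]
        have hTne := pvAlphaIdx_ne_nil st (pre.length + (m0 :: mt).length + 1) hstany
        have hlb := pvAlphaIdx_lb st (pre.length + (m0 :: mt).length + 1) _
          (getLastD_mem _ 0 hTne)
        have hdense := pvAlphaIdx_dense st (pre.length + (m0 :: mt).length + 1) hTne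
        have hhead : (List.range' pre.length (m0 :: mt).length ++
            pvAlphaIdx (pre.length + (m0 :: mt).length + 1) st).headD 0 = pre.length := by
          rw [List.length_cons, List.range'_succ]; rfl
        have hlast := getLastD_append_of_ne_nil (List.range' pre.length (m0 :: mt).length)
          (pvAlphaIdx (pre.length + (m0 :: mt).length + 1) st) 0 hTne
        rw [if_neg (by simp), if_pos (by
          rw [hhead, hlast]
          simp only [List.length_append, List.length_range', List.length_cons] at *
          omega)]
    · -- the alphabetic chars form one contiguous run
      rw [if_neg hany]
      have hsufF : ∀ c ∈ suf, PySem.Chars.isalpha c = false := by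
        intro c hc
        cases h : PySem.Chars.isalpha c
        · rfl
        · exact absurd (List.any_eq_true.mpr ⟨c, hc, h⟩) hany
      have hTnil : pvAlphaIdx (pre.length + (m0 :: mt).length) suf = [] :=
        pvAlphaIdx_none _ _ hsufF
      have hgl : (List.range' pre.length (m0 :: mt).length).getLastD 0 =
          pre.length + mt.length := by
        rw [List.length_cons, range'_getLastD _ _ _ (by omega)]
        omega
      have hhd : (List.range' pre.length (m0 :: mt).length).headD 0 = pre.length := by
        rw [List.length_cons, List.range'_succ]; rfl
      rw [hTnil, List.append_nil, hhd, hgl]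
      have hlen : (List.range' pre.length (m0 :: mt).length).length = mt.length + 1 := by
        simp
      rw [if_neg (show ¬(List.range' pre.length (m0 :: mt).length = []) by simp),
        if_neg (show ¬(pre.length + mt.length - pre.length + 1 ≠
          (List.range' pre.length (m0 :: mt).length).length) by rw [hlen]; omega)]
      have hslice : PySem.List.slice word.toList (some ((pre.length : Nat) : Int))
          (some ((pre.length + mt.length + 1 : Nat) : Int)) = m0 :: mt := by
        rw [PySem.List.slice_natCast, hdecomp, List.drop_left]
        have h1 : pre.length + mt.length + 1 - pre.length = mt.length + 1 := by omega
        rw [h1]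
        exact List.take_left' (by simp)
      rw [hslice]
      by_cases hup : pyStrIsupper (m0 :: mt) = true
      · rw [if_pos hup, if_neg (show ¬((!pyStrIsupper (m0 :: mt)) = true) by simp [hup])]
        have h1 : PySem.List.slice word.toList none (some ((pre.length : Nat) : Int)) = pre := by
          rw [PySem.List.slice_to_natCast, hdecomp, List.take_left]
        have h2 : PySem.List.slice word.toList
            (some ((pre.length + mt.length + 1 : Nat) : Int)) none = suf := by
          rw [PySem.List.slice_from_natCast, hdecomp,
            show pre ++ (m0 :: mt ++ suf) = (pre ++ m0 :: mt) ++ suf by simp,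
            show pre.length + mt.length + 1 = (pre ++ m0 :: mt).length by simp; omega]
          exact List.drop_left
        rw [h1, h2]
      · have hup' : pyStrIsupper (m0 :: mt) = false := by
          revert hup; cases pyStrIsupper (m0 :: mt) <;> simp
        rw [if_neg hup, if_pos (show (!pyStrIsupper (m0 :: mt)) = true by rw [hup']; rfl)]
        rw [show (pre ++ (m0 :: mt)) ++ suf = word.toList by rw [hdecomp]; simp, hword]

-- ===== VERDICT (by name: the statement is the Claim_ definition above) =====
theorem expand_acronym_spec : Claim_equal_expand_acronym := by
  intro word _
  unfold Spec_expand_acronym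
  exact expand_acronym_eq word
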